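-- pv_equiv track=rewrite | github.com/Devvv2607/VOICE-ASSISTANT | main.py | extract_news_params
-- ===== SOURCE A (Python) =====
-- def extract_news_params(text):
--     """Extract news parameters."""
--     params = {}
--
--     # Extract category
--     if any(word in text for word in ['tech', 'technology']):
--         params['category'] = 'technology'
--     elif any(word in text for word in ['business', 'finance']):
--         params['category'] = 'business'
--     elif any(word in text for word in ['sports']):
--         params['category'] = 'sports'
--     elif any(word in text for word in ['health']):
--         params['category'] = 'health'
--     else:
--         params['category'] = 'general'
--
--     return params
-- ===== SOURCE B (Python) =====
-- # One left-to-right scan over the text positions: record the best (lowest)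
-- # priority of any keyword that starts at each position, then map the best
-- # priority to its category.  'technology' needs no rule of its own: any text
-- # containing 'technology' contains 'tech', which carries the same category.
-- KEYWORDS = {'tech': 0, 'business': 1, 'finance': 1, 'sports': 2, 'health': 3}
-- CATEGORIES = ['technology', 'business', 'sports', 'health', 'general']
--
--
-- def extract_news_params(text):
--     """Extract news parameters."""
--     best = 4
--     for i in range(len(text)):
--         for kw, p in KEYWORDS.items():
--             if text.startswith(kw, i):
--                 best = min(best, p)
--     return {'category': CATEGORIES[best]}
-- ===== Notes on version B (the rewrite author's own statement) =====
-- stated objective: alternative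
-- what changed: Instead of A's if/elif chain of per-keyword substring searches, B makes one left-to-right scan over the text positions, recording the best (lowest) priority of any keyword starting at each position, and maps that priority to its category; 'technology' needs no rule of its own since any text containing it contains 'tech'.
import Mathlib
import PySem

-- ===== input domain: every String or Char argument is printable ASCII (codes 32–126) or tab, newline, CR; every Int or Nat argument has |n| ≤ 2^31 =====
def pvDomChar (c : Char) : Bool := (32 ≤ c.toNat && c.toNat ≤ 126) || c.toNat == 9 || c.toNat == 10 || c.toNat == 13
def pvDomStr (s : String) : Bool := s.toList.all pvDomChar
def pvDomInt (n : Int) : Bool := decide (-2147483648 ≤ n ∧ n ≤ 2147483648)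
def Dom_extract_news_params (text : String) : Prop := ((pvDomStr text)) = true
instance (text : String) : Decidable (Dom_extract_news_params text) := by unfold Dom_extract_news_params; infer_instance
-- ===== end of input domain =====

-- B replaces A's chain of per-keyword substring searches by ONE left-to-right scan over the
-- text positions, recording the best (lowest) keyword priority found and mapping it to its
-- category ('technology' needs no rule: containing it implies containing 'tech'); objective: alternative.


-- ===== PORT A =====
def extract_news_params (text : String) : List (String × String) :=
  let params : PySem.Dict String String := PySem.Dict.empty
  let params :=
    if (["tech", "technology"].any fun word => PySem.Str.isIn word text) then
      params.insert "category" "technology"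
    else if (["business", "finance"].any fun word => PySem.Str.isIn word text) then
      params.insert "category" "business"
    else if (["sports"].any fun word => PySem.Str.isIn word text) then
      params.insert "category" "sports"
    else if (["health"].any fun word => PySem.Str.isIn word text) then
      params.insert "category" "health"
    else
      params.insert "category" "general"
  params.items

-- ===== PORT B =====
-- the KEYWORDS dict: keyword ↦ priority
def pvKeywords : List (List Char × Nat) :=
  [(['t','e','c','h'], 0), (['b','u','s','i','n','e','s','s'], 1), (['f','i','n','a','n','c','e'], 1),
   (['s','p','o','r','t','s'], 2), (['h','e','a','l','t','h'], 3)]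

def pvCategories : List String := ["technology", "business", "sports", "health", "general"]

-- Python's min on two ints, written out (min(a, b) returns the smaller, a on ties)
def pvMin (a b : Nat) : Nat := if a ≤ b then a else b

-- the inner loop at one position i: 'if text.startswith(kw, i): best = min(best, p)' for each keyword
-- (text.startswith(kw, i) with 0 ≤ i is exactly: kw is a prefix of text[i:])
def pvStep (cs : List Char) (i : Nat) (best : Nat) : Nat :=
  pvKeywords.foldl (fun b kv => if kv.1.isPrefixOf (cs.drop i) then pvMin b kv.2 else b) best

def extract_news_params_alt (text : String) : List (String × String) :=
  let cs := text.toList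
  let best := (List.range cs.length).foldl (fun b i => pvStep cs i b) 4
  [("category", pvCategories.getD best "general")]

-- ===== PRECONDITION & SPEC =====
def Spec_extract_news_params (text : String) (out : List (String × String)) : Prop := out = extract_news_params_alt text
instance (text : String) (out : List (String × String)) : Decidable (Spec_extract_news_params text out) := by unfold Spec_extract_news_params; infer_instance

-- ===== CLAIM (what is proved, stated in full; the proofs are below) =====
def Claim_equal_extract_news_params : Prop := ∀ (text : String), Dom_extract_news_params text → Spec_extract_news_params text (extract_news_params text)

-- ===== LEMMAS AND PROOFS =====

-- pvMin reaches ≤ k iff one argument does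
theorem pvMin_le_iff (a b k : Nat) : pvMin a b ≤ k ↔ a ≤ k ∨ b ≤ k := by
  unfold pvMin; split_ifs <;> omega

-- the inner fold over the keyword table reaches ≤ k iff the accumulator does or a matching keyword's priority does
theorem pvInner_le_iff (d : List Char) (ks : List (List Char × Nat)) (b k : Nat) :
    (ks.foldl (fun b kv => if kv.1.isPrefixOf d then pvMin b kv.2 else b) b ≤ k) ↔
      b ≤ k ∨ ∃ kv ∈ ks, kv.1.isPrefixOf d = true ∧ kv.2 ≤ k := by
  induction ks generalizing b with
  | nil => simp
  | cons kv ks ih =>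
      rw [List.foldl_cons]
      by_cases hp : kv.1.isPrefixOf d = true
      · rw [if_pos hp, ih, pvMin_le_iff, List.exists_mem_cons_iff]; tauto
      · rw [if_neg hp, ih, List.exists_mem_cons_iff]; tauto

-- the outer fold over the positions reaches ≤ k iff the start value does or some keyword matches at some position
theorem pvFold_le_iff (cs : List Char) (l : List Nat) (b k : Nat) :
    (l.foldl (fun b i => pvStep cs i b) b ≤ k) ↔
      b ≤ k ∨ ∃ i ∈ l, ∃ kv ∈ pvKeywords, kv.1.isPrefixOf (cs.drop i) = true ∧ kv.2 ≤ k := by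
  induction l generalizing b with
  | nil => simp
  | cons x l ih =>
      rw [List.foldl_cons, ih, List.exists_mem_cons_iff]
      conv_lhs => rw [pvStep, pvInner_le_iff]
      exact or_assoc

-- a nonempty keyword that is a prefix of some drop occurs at an index < length, i.e. is a substring
theorem pvExists_range_prefix (sub cs : List Char) (h : sub ≠ []) :
    (∃ i, i < cs.length ∧ sub <+: cs.drop i) ↔ PySem.Chars.isIn sub cs = true := by
  rw [← PySem.Chars.exists_prefix_drop_iff_isIn]
  constructor
  · rintro ⟨i, _, hp⟩; exact ⟨i, hp⟩
  · rintro ⟨j, hp⟩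
    by_cases hj : j < cs.length
    · exact ⟨j, hj, hp⟩
    · exfalso
      have hnil : cs.drop j = [] := List.drop_eq_nil_of_le (by omega)
      rw [hnil] at hp
      exact h (List.prefix_nil.mp hp)

-- closed form of B's port: the five substring tests in priority order
set_option maxHeartbeats 2000000 in
theorem pvAlt_closed (text : String) :
    extract_news_params_alt text =
      [("category",
        if PySem.Chars.isIn "tech".toList text.toList = true then "technology"
        else if PySem.Chars.isIn "business".toList text.toList = true then "business"
        else if PySem.Chars.isIn "finance".toList text.toList = true then "business"
        else if PySem.Chars.isIn "sports".toList text.toList = true then "sports"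
        else if PySem.Chars.isIn "health".toList text.toList = true then "health"
        else "general")] := by
  unfold extract_news_params_alt
  dsimp only
  set cs := text.toList with hcs
  set r := (List.range cs.length).foldl (fun b i => pvStep cs i b) 4 with hr
  have H := fun k => pvFold_le_iff cs (List.range cs.length) 4 k
  rw [← hr] at H
  have e0 : ("tech".toList : List Char) = ['t','e','c','h'] := rfl
  have e1 : ("business".toList : List Char) = ['b','u','s','i','n','e','s','s'] := rfl
  have e2 : ("finance".toList : List Char) = ['f','i','n','a','n','c','e'] := rfl
  have e3 : ("sports".toList : List Char) = ['s','p','o','r','t','s'] := rfl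
  have e4 : ("health".toList : List Char) = ['h','e','a','l','t','h'] := rfl
  have h0 : r ≤ 0 ↔ PySem.Chars.isIn "tech".toList cs = true := by
    rw [H 0, ← pvExists_range_prefix "tech".toList cs (by simp [e0]), e0]
    simp [pvKeywords]
  have h1 : r ≤ 1 ↔ (PySem.Chars.isIn "tech".toList cs = true ∨
      PySem.Chars.isIn "business".toList cs = true ∨ PySem.Chars.isIn "finance".toList cs = true) := by
    rw [H 1, ← pvExists_range_prefix "tech".toList cs (by simp [e0]),
      ← pvExists_range_prefix "business".toList cs (by simp [e1]),
      ← pvExists_range_prefix "finance".toList cs (by simp [e2]), e0, e1, e2]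
    simp [pvKeywords]
    aesop
  have h2 : r ≤ 2 ↔ (PySem.Chars.isIn "tech".toList cs = true ∨
      PySem.Chars.isIn "business".toList cs = true ∨ PySem.Chars.isIn "finance".toList cs = true ∨
      PySem.Chars.isIn "sports".toList cs = true) := by
    rw [H 2, ← pvExists_range_prefix "tech".toList cs (by simp [e0]),
      ← pvExists_range_prefix "business".toList cs (by simp [e1]),
      ← pvExists_range_prefix "finance".toList cs (by simp [e2]),
      ← pvExists_range_prefix "sports".toList cs (by simp [e3]), e0, e1, e2, e3]
    simp [pvKeywords]
    aesop
  have h3 : r ≤ 3 ↔ (PySem.Chars.isIn "tech".toList cs = true ∨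
      PySem.Chars.isIn "business".toList cs = true ∨ PySem.Chars.isIn "finance".toList cs = true ∨
      PySem.Chars.isIn "sports".toList cs = true ∨ PySem.Chars.isIn "health".toList cs = true) := by
    rw [H 3, ← pvExists_range_prefix "tech".toList cs (by simp [e0]),
      ← pvExists_range_prefix "business".toList cs (by simp [e1]),
      ← pvExists_range_prefix "finance".toList cs (by simp [e2]),
      ← pvExists_range_prefix "sports".toList cs (by simp [e3]),
      ← pvExists_range_prefix "health".toList cs (by simp [e4]), e0, e1, e2, e3, e4]
    simp [pvKeywords]
    aesop
  have h4 : r ≤ 4 := by rw [H 4]; left; omega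
  by_cases c0 : PySem.Chars.isIn "tech".toList cs = true
  · have : r = 0 := by have := h0.mpr c0; omega
    rw [this, if_pos c0]; rfl
  · by_cases c1 : PySem.Chars.isIn "business".toList cs = true
    · have : r = 1 := by
        have hu := h1.mpr (Or.inr (Or.inl c1))
        have hl : ¬ r ≤ 0 := fun hc => c0 (h0.mp hc)
        omega
      rw [this, if_neg c0, if_pos c1]; rfl
    · by_cases c2 : PySem.Chars.isIn "finance".toList cs = true
      · have : r = 1 := by
          have hu := h1.mpr (Or.inr (Or.inr c2))
          have hl : ¬ r ≤ 0 := fun hc => c0 (h0.mp hc)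
          omega
        rw [this, if_neg c0, if_neg c1, if_pos c2]; rfl
      · by_cases c3 : PySem.Chars.isIn "sports".toList cs = true
        · have : r = 2 := by
            have hu := h2.mpr (Or.inr (Or.inr (Or.inr c3)))
            have hl : ¬ r ≤ 1 := fun hc => by rcases h1.mp hc with h | h | h <;> simp_all
            omega
          rw [this, if_neg c0, if_neg c1, if_neg c2, if_pos c3]; rfl
        · by_cases c4 : PySem.Chars.isIn "health".toList cs = true
          · have : r = 3 := by
              have hu := h3.mpr (Or.inr (Or.inr (Or.inr (Or.inr c4))))
              have hl : ¬ r ≤ 2 := fun hc => by rcases h2.mp hc with h | h | h | h <;> simp_all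
              omega
            rw [this, if_neg c0, if_neg c1, if_neg c2, if_neg c3, if_pos c4]; rfl
          · have : r = 4 := by
              have hl : ¬ r ≤ 3 := fun hc => by
                rcases h3.mp hc with h | h | h | h | h <;> simp_all
              omega
            rw [this, if_neg c0, if_neg c1, if_neg c2, if_neg c3, if_neg c4]; rfl

-- 'technology' in the text implies 'tech' in the text
theorem pvTech_of_technology (cs : List Char) :
    PySem.Chars.isIn "technology".toList cs = true → PySem.Chars.isIn "tech".toList cs = true := by
  intro h
  rw [PySem.Chars.isIn_iff_infix] at h ⊢
  exact List.IsInfix.trans ⟨[], "nology".toList, rfl⟩ h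

-- ===== VERDICT (by name: the statement is the Claim_ definition above) =====
theorem extract_news_params_spec : Claim_equal_extract_news_params := by
  intro text _
  unfold Spec_extract_news_params extract_news_params
  rw [pvAlt_closed]
  have bridge : ∀ w : String, PySem.Str.isIn w text = PySem.Chars.isIn w.toList text.toList := by
    intro w; simp [PySem.Str.isIn]
  simp only [List.any_cons, List.any_nil, Bool.or_false, bridge]
  by_cases c0 : PySem.Chars.isIn ['t','e','c','h'] text.toList = true
  · simp [c0, PySem.Dict.empty, PySem.Dict.insert]
  · by_cases ct : PySem.Chars.isIn ['t','e','c','h','n','o','l','o','g','y'] text.toList = true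
    · exact absurd (pvTech_of_technology _ ct) c0
    · by_cases c1 : PySem.Chars.isIn ['b','u','s','i','n','e','s','s'] text.toList = true
      · simp [c0, ct, c1, PySem.Dict.empty, PySem.Dict.insert]
      · by_cases c2 : PySem.Chars.isIn ['f','i','n','a','n','c','e'] text.toList = true
        · simp [c0, ct, c1, c2, PySem.Dict.empty, PySem.Dict.insert]
        · by_cases c3 : PySem.Chars.isIn ['s','p','o','r','t','s'] text.toList = true
          · simp [c0, ct, c1, c2, c3, PySem.Dict.empty, PySem.Dict.insert]
          · by_cases c4 : PySem.Chars.isIn ['h','e','a','l','t','h'] text.toList = true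
            · simp [c0, ct, c1, c2, c3, c4, PySem.Dict.empty, PySem.Dict.insert]
            · simp [c0, ct, c1, c2, c3, c4, PySem.Dict.empty, PySem.Dict.insert]
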